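-- pv_equiv track=rewrite | github.com/WXWXwqz/radar | radar_data.py | find_closest_numbers
-- ===== SOURCE A (Python) =====
-- def find_closest_numbers(nums):
--     closest_nums = []
--     for i, num in enumerate(nums):
--         closest = None
--         closest_distance = float('inf')
--         for j, other_num in enumerate(nums):
--             if i != j:
--                 distance = abs(num - other_num)
--                 if distance < closest_distance:
--                     closest_distance = distance
--                     closest = other_num
--         closest_nums.append(closest)
--     return closest_nums
-- ===== SOURCE B (Python) =====
-- def find_closest_numbers(nums):
--     # O(n log n): sort the distinct values once; each element's nearest other
--     # element is a duplicate of itself or a neighbouring distinct value, with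
--     # ties broken by the smaller first-occurrence index (as A's scan does).
--     first = {}
--     count = {}
--     for i, v in enumerate(nums):
--         if v not in first:
--             first[v] = i
--         count[v] = count.get(v, 0) + 1
--     vals = sorted(first)
--     ans = {}
--     for k, v in enumerate(vals):
--         if count[v] > 1:
--             ans[v] = v
--         else:
--             cands = []
--             if k > 0:
--                 p = vals[k - 1]
--                 cands.append((v - p, first[p], p))
--             if k + 1 < len(vals):
--                 q = vals[k + 1]
--                 cands.append((q - v, first[q], q))
--             ans[v] = min(cands)[2] if cands else None
--     return [ans[v] for v in nums]
-- ===== Notes on version B (the rewrite author's own statement) =====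
-- stated objective: faster
-- what changed: A compares every element against all others (quadratic all-pairs scan); B builds first-occurrence/count dictionaries in one pass, sorts the distinct values once, and answers each element from its duplicate count or its two sorted neighbours with the first-occurrence index as tie-break.
import Mathlib
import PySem

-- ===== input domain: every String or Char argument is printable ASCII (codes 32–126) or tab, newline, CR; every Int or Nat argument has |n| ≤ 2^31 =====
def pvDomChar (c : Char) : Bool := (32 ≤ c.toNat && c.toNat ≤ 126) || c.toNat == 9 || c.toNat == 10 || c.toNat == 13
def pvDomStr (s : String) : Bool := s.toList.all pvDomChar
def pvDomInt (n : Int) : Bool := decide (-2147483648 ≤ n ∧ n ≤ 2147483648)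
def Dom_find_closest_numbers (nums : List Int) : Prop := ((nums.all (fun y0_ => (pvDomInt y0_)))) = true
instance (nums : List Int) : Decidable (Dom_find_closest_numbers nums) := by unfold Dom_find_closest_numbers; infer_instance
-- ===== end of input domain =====

-- B replaces A's quadratic all-pairs scan by a sort of the distinct values: each element's
-- nearest other element is a duplicate of itself or an adjacent distinct value, ties broken
-- by smaller first-occurrence index (A's scan order).  Objective: faster (O(n^2) → O(n log n)).

-- ===== PORT A =====
-- inner loop of A: scan all (j, other_num), keep (closest, closest_distance);
-- closest_distance = float('inf') is modelled as `none` (every distance beats it), exact here.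
def pvInnerA (nums : List Int) (i : Int) (num : Int) : Option Int × Option Int :=
  (PySem.List.enumerate nums).foldl
    (fun st p =>
      if i ≠ p.1 then
        let distance := |num - p.2|
        match st.2 with
        | none => (some p.2, some distance)
        | some cd => if distance < cd then (some p.2, some distance) else st
      else st)
    (none, none)

def find_closest_numbers (nums : List Int) : List (Option Int) :=
  (PySem.List.enumerate nums).foldl (fun acc p => acc ++ [(pvInnerA nums p.1 p.2).1]) []

-- ===== PORT B =====
def find_closest_numbers_alt (nums : List Int) : List (Option Int) :=
  -- first occurrence index and multiplicity of every value, one pass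
  let fc := (PySem.List.enumerate nums).foldl
    (fun (st : PySem.Dict Int Int × PySem.Dict Int Int) p =>
      ((if st.1.contains p.2 then st.1 else st.1.insert p.2 p.1),
       st.2.insert p.2 (st.2.getD p.2 0 + 1)))
    (PySem.Dict.empty, PySem.Dict.empty)
  let first := fc.1
  let count := fc.2
  let vals := PySem.List.sorted first.keys (fun x => x) false
  -- answer per distinct value, walking the sorted distinct values once
  let ans := (PySem.List.enumerate vals).foldl
    (fun (a : PySem.Dict Int (Option Int)) p =>
      if 1 < count.getD p.2 0 then
        a.insert p.2 (some p.2)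
      else
        let cands : List (Int × Int × Int) :=
          (if 0 < p.1 then
             let pv := PySem.List.pyGetD vals (p.1 - 1) 0
             [(p.2 - pv, first.getD pv 0, pv)]    -- first[pv]: pv is always a key of first
           else []) ++
          (if p.1 + 1 < (vals.length : Int) then
             let qv := PySem.List.pyGetD vals (p.1 + 1) 0
             [(qv - p.2, first.getD qv 0, qv)]
           else [])
        a.insert p.2 ((PySem.List.min2? cands (·.1) (·.2.1)).map (·.2.2)))
    PySem.Dict.empty
  nums.map (fun v => (ans.get? v).getD none)   -- ans[v]: every v ∈ nums is a key of ans

-- ===== PRECONDITION & SPEC =====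
def Spec_find_closest_numbers (nums : List Int) (out : List (Option Int)) : Prop := out = find_closest_numbers_alt nums
instance (nums : List Int) (out : List (Option Int)) : Decidable (Spec_find_closest_numbers nums out) := by unfold Spec_find_closest_numbers; infer_instance

-- ===== CLAIM (what is proved, stated in full; the proofs are below) =====
def Claim_equal_find_closest_numbers : Prop := ∀ (nums : List Int), Dom_find_closest_numbers nums → Spec_find_closest_numbers nums (find_closest_numbers nums)

-- ===== LEMMAS AND PROOFS =====

-- ---------- A side: the inner loop keeps the first minimum-distance candidate ----------

-- candidate triples (distance, index, value) of position i, in index order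
def pvCands (nums : List Int) (i : Int) (v : Int) : List (Int × Int × Int) :=
  (PySem.List.enumerate nums).filterMap
    (fun p => if i ≠ p.1 then some (|v - p.2|, p.1, p.2) else none)

-- keep-first-minimum-by-distance step (what A's inner loop computes on the candidates)
def pvStep3 (st : Option (Int × Int × Int)) (c : Int × Int × Int) : Option (Int × Int × Int) :=
  match st with
  | none => some c
  | some b => if c.1 < b.1 then some c else st

def pvLexLe (c c' : Int × Int × Int) : Prop :=
  c.1 < c'.1 ∨ (c.1 = c'.1 ∧ c.2.1 ≤ c'.2.1)

def pvIsMin (l : List (Int × Int × Int)) (c : Int × Int × Int) : Prop :=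
  c ∈ l ∧ ∀ c' ∈ l, pvLexLe c c'

def pvPick (b : Int × Int × Int) (t : List (Int × Int × Int)) : Int × Int × Int :=
  t.foldl (fun m c => if c.1 < m.1 then c else m) b

lemma pvLexLe_trans {a b c : Int × Int × Int} (h1 : pvLexLe a b) (h2 : pvLexLe b c) : pvLexLe a c := by
  unfold pvLexLe at *; omega

lemma pvA_fold_aux (i v : Int) (l : List (Int × Int)) : ∀ b : Option (Int × Int × Int),
    l.foldl
      (fun st p =>
        if i ≠ p.1 then
          let distance := |v - p.2|
          match st.2 with
          | none => (some p.2, some distance)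
          | some cd => if distance < cd then (some p.2, some distance) else st
        else st)
      (b.map (·.2.2), b.map (·.1))
    = (((l.filterMap (fun p => if i ≠ p.1 then some (|v - p.2|, p.1, p.2) else none)).foldl pvStep3 b).map (·.2.2),
       ((l.filterMap (fun p => if i ≠ p.1 then some (|v - p.2|, p.1, p.2) else none)).foldl pvStep3 b).map (·.1)) := by
  induction l with
  | nil => intro b; simp
  | cons p t ih =>
    intro b
    by_cases hip : i ≠ p.1
    · simp only [List.foldl_cons, List.filterMap_cons, if_pos hip]
      cases b with
      | none => simpa using ih (some (|v - p.2|, p.1, p.2))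
      | some b3 =>
        simp only [Option.map_some]
        by_cases hd : |v - p.2| < b3.1
        · simp only [pvStep3, if_pos hd]
          simpa using ih (some (|v - p.2|, p.1, p.2))
        · simp only [pvStep3, if_neg hd]
          simpa using ih (some b3)
    · simp only [List.foldl_cons, List.filterMap_cons, if_neg hip]
      exact ih b

lemma pvInnerA_eq_fold (nums : List Int) (i v : Int) :
    (pvInnerA nums i v).1 = ((pvCands nums i v).foldl pvStep3 none).map (·.2.2) := by
  unfold pvInnerA pvCands
  have := pvA_fold_aux i v (PySem.List.enumerate nums) none
  simp only [Option.map_none] at this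
  rw [this]

lemma mem_pvCands (nums : List Int) (i v : Int) (c : Int × Int × Int) :
    c ∈ pvCands nums i v ↔
      ∃ k : Nat, ∃ h : k < nums.length, i ≠ (k : Int) ∧ c = (|v - nums[k]|, (k : Int), nums[k]) := by
  unfold pvCands
  simp only [List.mem_filterMap]
  constructor
  · rintro ⟨p, hp, hfp⟩
    obtain ⟨k, hk, rfl⟩ := (PySem.List.mem_enumerate_iff nums 0 p).mp hp
    by_cases h : i ≠ (0 + (k : Int))
    · refine ⟨k, hk, by omega, ?_⟩
      rw [if_pos h] at hfp
      simp only [Option.some_inj] at hfp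
      rw [← hfp]
      norm_num
    · rw [if_neg h] at hfp; exact absurd hfp (by simp)
  · rintro ⟨k, hk, hik, rfl⟩
    refine ⟨(0 + (k : Int), nums[k]), ?_, ?_⟩
    · exact (PySem.List.mem_enumerate_iff nums 0 _).mpr ⟨k, hk, rfl⟩
    · rw [if_pos (by omega)]; norm_num

lemma pairwise_pvCands (nums : List Int) (i v : Int) :
    (pvCands nums i v).Pairwise (fun a b => a.2.1 < b.2.1) := by
  unfold pvCands
  rw [List.pairwise_filterMap]
  refine (PySem.List.pairwise_lt_enumerate nums 0).imp ?_
  intro a b hab x hx y hy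
  split at hx
  · split at hy
    · simp only [Option.some_inj] at hx hy
      rw [← hx, ← hy]; exact hab
    · exact absurd hy (by simp)
  · exact absurd hx (by simp)

lemma pvFold3_some (t : List (Int × Int × Int)) : ∀ b,
    t.foldl pvStep3 (some b) = some (pvPick b t) := by
  induction t with
  | nil => intro b; simp [pvPick]
  | cons x t ih =>
    intro b
    simp only [List.foldl_cons, pvStep3, pvPick, List.foldl_cons]
    by_cases h : x.1 < b.1 <;> simp [h, ih, pvPick]

lemma pvFold3_none (l : List (Int × Int × Int)) :
    l.foldl pvStep3 none = none ↔ l = [] := by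
  cases l with
  | nil => simp
  | cons x t => simp [pvStep3, pvFold3_some]

lemma pvPick_isMin (t : List (Int × Int × Int)) : ∀ b,
    (b :: t).Pairwise (fun a b => a.2.1 < b.2.1) → pvIsMin (b :: t) (pvPick b t) := by
  induction t with
  | nil =>
    intro b _
    refine ⟨by simp [pvPick], ?_⟩
    intro c' hc'
    simp at hc'
    subst hc'
    unfold pvLexLe pvPick
    simp
  | cons x t ih =>
    intro b hp
    have hbx : b.2.1 < x.2.1 := (List.pairwise_cons.mp hp).1 x (List.mem_cons_self)
    have hp' := (List.pairwise_cons.mp hp).2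
    have hpbt : (b :: t).Pairwise (fun a b => a.2.1 < b.2.1) := by
      have : (b :: t).Sublist (b :: x :: t) := by simp
      exact hp.sublist this
    have hstep : pvPick b (x :: t) = pvPick (if x.1 < b.1 then x else b) t := by
      simp [pvPick]
    by_cases h : x.1 < b.1
    · rw [hstep, if_pos h]
      obtain ⟨hm, hle⟩ := ih x hp'
      refine ⟨List.mem_cons_of_mem b hm, ?_⟩
      intro c' hc'
      rcases List.mem_cons.mp hc' with rfl | hc'
      · exact pvLexLe_trans (hle x List.mem_cons_self) (Or.inl h)
      · exact hle c' hc'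
    · rw [hstep, if_neg h]
      obtain ⟨hm, hle⟩ := ih b hpbt
      refine ⟨?_, ?_⟩
      · rcases List.mem_cons.mp hm with hm' | hm'
        · rw [hm']; exact List.mem_cons_self
        · exact List.mem_cons_of_mem _ (List.mem_cons_of_mem _ hm')
      · intro c' hc'
        rcases List.mem_cons.mp hc' with rfl | hc'
        · exact hle c' List.mem_cons_self
        rcases List.mem_cons.mp hc' with rfl | hc'
        · refine pvLexLe_trans (hle b List.mem_cons_self) ?_
          unfold pvLexLe; omega
        · exact hle c' (List.mem_cons_of_mem _ hc')

lemma pvFold3_isMin (l : List (Int × Int × Int))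
    (hp : l.Pairwise (fun a b => a.2.1 < b.2.1)) (c : Int × Int × Int)
    (h : l.foldl pvStep3 none = some c) : pvIsMin l c := by
  cases l with
  | nil => simp at h
  | cons b t =>
    have : (b :: t).foldl pvStep3 none = t.foldl pvStep3 (some b) := by simp [pvStep3]
    rw [this, pvFold3_some] at h
    obtain rfl : pvPick b t = c := by simpa using h
    exact pvPick_isMin t b hp

-- ---------- B side: closed forms for the dictionaries ----------

lemma pvFoldl_enumerate_snd {α σ : Type} (g : σ → α → σ) (xs : List α) : ∀ (s : Int) (d : σ),
    (PySem.List.enumerate xs s).foldl (fun d p => g d p.2) d = xs.foldl g d := by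
  induction xs with
  | nil => intro s d; simp [PySem.List.enumerate]
  | cons x t ih => intro s d; rw [PySem.List.enumerate_cons]; simp only [List.foldl_cons]; exact ih (s+1) (g d x)

def pvF1 (d : PySem.Dict Int Int) (p : Int × Int) : PySem.Dict Int Int :=
  if d.contains p.2 then d else d.insert p.2 p.1

def pvFirstD (nums : List Int) : PySem.Dict Int Int :=
  (PySem.List.enumerate nums).foldl pvF1 PySem.Dict.empty

def pvCountD (nums : List Int) : PySem.Dict Int Int :=
  nums.foldl (fun d x => d.insert x (d.getD x 0 + 1)) PySem.Dict.empty

def pvVals (nums : List Int) : List Int :=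
  PySem.List.sorted (PySem.Set.ofList nums) (fun x => x) false

lemma pvFirst_keys (xs : List Int) : ∀ (s : Int) (d : PySem.Dict Int Int),
    ((PySem.List.enumerate xs s).foldl pvF1 d).keys = PySem.Set.update d.keys xs := by
  induction xs with
  | nil => intro s d; simp [PySem.List.enumerate, PySem.Set.update]
  | cons x t ih =>
    intro s d
    rw [PySem.List.enumerate_cons]
    simp only [List.foldl_cons]
    rw [ih (s+1) (pvF1 d (s, x)), PySem.Set.update_cons]
    congr 1
    unfold pvF1
    by_cases h : d.contains x
    · simp only [h, if_pos]
      exact (PySem.Set.add_of_mem ((PySem.Dict.contains_iff_mem_keys d x).mp h)).symm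
    · rw [if_neg h]
      rw [PySem.Dict.keys_insert_of_not_contains d s (by simpa using h)]
      rw [PySem.Set.add_of_not_mem]
      intro hm
      exact h ((PySem.Dict.contains_iff_mem_keys d x).mpr hm)

lemma pvFirst_get (xs : List Int) : ∀ (s : Int) (d : PySem.Dict Int Int) (v : Int),
    ((PySem.List.enumerate xs s).foldl pvF1 d).get? v =
      (d.get? v).or ((PySem.List.index? xs v).map (fun k => s + (k : Int))) := by
  induction xs with
  | nil => intro s d v; simp [PySem.List.enumerate, PySem.List.index?]
  | cons x t ih =>
    intro s d v
    rw [PySem.List.enumerate_cons]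
    simp only [List.foldl_cons]
    rw [ih (s+1) (pvF1 d (s, x)) v]
    unfold pvF1
    by_cases hvx : v = x
    · subst hvx
      rw [PySem.List.index?_cons_self]
      by_cases h : d.contains v
      · simp only [h, if_pos]
        have : (d.get? v).isSome := by rw [PySem.Dict.contains_eq_isSome_get?] at h; exact h
        obtain ⟨w, hw⟩ := Option.isSome_iff_exists.mp this
        simp [hw]
      · rw [if_neg h]
        have hd : d.get? v = none := (PySem.Dict.get?_eq_none_iff_contains d v).mpr (by simpa using h)
        rw [PySem.Dict.get?_insert_self, hd]
        simp
    · rw [PySem.List.index?_cons_of_ne t (fun h => hvx h.symm)]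
      have hget : (if d.contains x then d else d.insert x s).get? v = d.get? v := by
        by_cases h : d.contains x
        · simp [h]
        · rw [if_neg (by simp [h])]
          exact PySem.Dict.get?_insert_of_ne d s hvx
      rw [hget]
      congr 1
      cases PySem.List.index? t v with
      | none => simp
      | some k =>
        have hk : s + 1 + (k : Int) = s + ((k : Int) + 1) := by ring
        simp [hk]

lemma pvFirstD_get' (nums : List Int) (v : Int) :
    (pvFirstD nums).get? v = (PySem.List.index? nums v).map (fun k => (k : Int)) := by
  unfold pvFirstD
  rw [pvFirst_get nums 0 PySem.Dict.empty v]
  simp [PySem.Dict.get?_empty, Option.or]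

lemma pvCountD_getD (nums : List Int) (v : Int) :
    (pvCountD nums).getD v 0 = (nums.count v : Int) := by
  unfold pvCountD
  rw [PySem.Dict.getD_foldl_insert_add_one]
  simp

lemma pvVals_pairwise (nums : List Int) : (pvVals nums).Pairwise (· < ·) :=
  PySem.List.sorted_ofList_pairwise_lt nums

lemma mem_pvVals (nums : List Int) (x : Int) : x ∈ pvVals nums ↔ x ∈ nums := by
  unfold pvVals
  rw [PySem.List.mem_sorted]
  exact PySem.Set.mem_ofList nums x

-- the per-distinct-value answer B computes
def pvBF (vals : List Int) (first count : PySem.Dict Int Int) (k v : Int) : Option Int :=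
  if 1 < count.getD v 0 then some v
  else
    ((PySem.List.min2?
       ((if 0 < k then
           [(v - PySem.List.pyGetD vals (k - 1) 0,
             first.getD (PySem.List.pyGetD vals (k - 1) 0) 0,
             PySem.List.pyGetD vals (k - 1) 0)]
         else []) ++
        (if k + 1 < (vals.length : Int) then
           [(PySem.List.pyGetD vals (k + 1) 0 - v,
             first.getD (PySem.List.pyGetD vals (k + 1) 0) 0,
             PySem.List.pyGetD vals (k + 1) 0)]
         else []))
       (·.1) (·.2.1)).map (·.2.2))

lemma pvAns_get_notmem (F : Int → Int → Option Int) (l : List Int) : ∀ (s : Int) (d : PySem.Dict Int (Option Int)) (v : Int),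
    v ∉ l →
    ((PySem.List.enumerate l s).foldl (fun a p => a.insert p.2 (F p.1 p.2)) d).get? v = d.get? v := by
  induction l with
  | nil => intro s d v _; simp [PySem.List.enumerate]
  | cons x t ih =>
    intro s d v hv
    rw [PySem.List.enumerate_cons]
    simp only [List.foldl_cons]
    rw [ih (s+1) _ v (fun h => hv (List.mem_cons_of_mem _ h))]
    exact PySem.Dict.get?_insert_of_ne d _ (fun h => hv (h ▸ List.mem_cons_self))

lemma pvAns_get (F : Int → Int → Option Int) (l : List Int) : ∀ (s : Int) (d : PySem.Dict Int (Option Int)) (v : Int),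
    l.Nodup →
    ((PySem.List.enumerate l s).foldl (fun a p => a.insert p.2 (F p.1 p.2)) d).get? v =
      (match PySem.List.index? l v with
       | some k => some (F (s + (k : Int)) v)
       | none => d.get? v) := by
  induction l with
  | nil => intro s d v _; simp [PySem.List.enumerate, PySem.List.index?]
  | cons x t ih =>
    intro s d v hnd
    rw [PySem.List.enumerate_cons]
    simp only [List.foldl_cons]
    by_cases hvx : v = x
    · subst hvx
      rw [pvAns_get_notmem F t (s+1) _ v (by simp at hnd; exact hnd.1)]
      rw [PySem.List.index?_cons_self, PySem.Dict.get?_insert_self]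
      norm_num
    · rw [ih (s+1) _ v (List.Nodup.of_cons hnd)]
      rw [PySem.List.index?_cons_of_ne t (fun h => hvx h.symm)]
      cases PySem.List.index? t v with
      | none => exact PySem.Dict.get?_insert_of_ne d _ hvx
      | some k =>
        have hk : s + 1 + (k : Int) = s + (((k : Int)) + 1) := by ring
        simp [hk]

-- B's output, element-wise
lemma pvB_closed (nums : List Int) :
    find_closest_numbers_alt nums =
      nums.map (fun v =>
        (match PySem.List.index? (pvVals nums) v with
         | some k => some (pvBF (pvVals nums) (pvFirstD nums) (pvCountD nums) (k : Int) v)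
         | none => none).getD none) := by
  unfold find_closest_numbers_alt
  have hcount : (PySem.List.enumerate nums).foldl
      (fun (d : PySem.Dict Int Int) (p : Int × Int) => d.insert p.2 (d.getD p.2 0 + 1))
      PySem.Dict.empty = pvCountD nums :=
    pvFoldl_enumerate_snd (fun (d : PySem.Dict Int Int) (x : Int) => d.insert x (d.getD x 0 + 1)) nums 0 PySem.Dict.empty
  have hsplit : (PySem.List.enumerate nums).foldl
      (fun (st : PySem.Dict Int Int × PySem.Dict Int Int) (p : Int × Int) =>
        ((if st.1.contains p.2 then st.1 else st.1.insert p.2 p.1),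
         st.2.insert p.2 (st.2.getD p.2 0 + 1)))
      (PySem.Dict.empty, PySem.Dict.empty) = (pvFirstD nums, pvCountD nums) := by
    have h := PySem.List.foldl_prod_mk
      (fun (d : PySem.Dict Int Int) (p : Int × Int) => if d.contains p.2 then d else d.insert p.2 p.1)
      (fun (d : PySem.Dict Int Int) (p : Int × Int) => d.insert p.2 (d.getD p.2 0 + 1))
      (PySem.List.enumerate nums) PySem.Dict.empty PySem.Dict.empty
    exact h.trans (by rw [hcount]; rfl)
  rw [hsplit]
  simp only []
  have hkeys : (pvFirstD nums).keys = PySem.Set.ofList nums := by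
    unfold pvFirstD
    rw [pvFirst_keys nums 0 PySem.Dict.empty, PySem.Dict.keys_empty, PySem.Set.update_nil_left]
  rw [hkeys]
  have hvals : PySem.List.sorted (PySem.Set.ofList nums) (fun x => x) false = pvVals nums := rfl
  rw [hvals]
  have hbody : (fun (a : PySem.Dict Int (Option Int)) (p : Int × Int) =>
      if 1 < (pvCountD nums).getD p.2 0 then
        a.insert p.2 (some p.2)
      else
        a.insert p.2 ((PySem.List.min2?
          ((if 0 < p.1 then
              [(p.2 - PySem.List.pyGetD (pvVals nums) (p.1 - 1) 0,
                (pvFirstD nums).getD (PySem.List.pyGetD (pvVals nums) (p.1 - 1) 0) 0,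
                PySem.List.pyGetD (pvVals nums) (p.1 - 1) 0)]
            else []) ++
           (if p.1 + 1 < ((pvVals nums).length : Int) then
              [(PySem.List.pyGetD (pvVals nums) (p.1 + 1) 0 - p.2,
                (pvFirstD nums).getD (PySem.List.pyGetD (pvVals nums) (p.1 + 1) 0) 0,
                PySem.List.pyGetD (pvVals nums) (p.1 + 1) 0)]
            else []))
          (·.1) (·.2.1)).map (·.2.2)))
      = (fun (a : PySem.Dict Int (Option Int)) (p : Int × Int) =>
          a.insert p.2 (pvBF (pvVals nums) (pvFirstD nums) (pvCountD nums) p.1 p.2)) := by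
    funext a p
    unfold pvBF
    by_cases h : 1 < (pvCountD nums).getD p.2 0 <;> simp [h]
  rw [hbody]
  have hnodup : (pvVals nums).Nodup := (pvVals_pairwise nums).imp ne_of_lt
  apply List.map_congr_left
  intro v _
  rw [pvAns_get (fun k v => pvBF (pvVals nums) (pvFirstD nums) (pvCountD nums) k v)
      (pvVals nums) 0 PySem.Dict.empty v hnodup]
  cases PySem.List.index? (pvVals nums) v with
  | none => simp [PySem.Dict.get?_empty]
  | some k => simp

lemma pvCount_split (nums : List Int) (i : Nat) (hi : i < nums.length) :
    nums.count nums[i] = (nums.take i).count nums[i] + 1 + (nums.drop (i+1)).count nums[i] := by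
  have h2 : nums.count nums[i] = (nums.take i).count nums[i] + (nums.drop i).count nums[i] := by
    rw [← List.count_append, List.take_append_drop]
  rw [h2, List.drop_eq_getElem_cons hi, List.count_cons_self]
  omega

lemma pvExists_other (nums : List Int) (i : Nat) (hi : i < nums.length)
    (h2 : 2 ≤ nums.count nums[i]) :
    ∃ j, ∃ hj : j < nums.length, j ≠ i ∧ nums[j] = nums[i] := by
  have hs := pvCount_split nums i hi
  by_cases ht : 1 ≤ (nums.take i).count nums[i]
  · have hmem : nums[i] ∈ nums.take i := List.one_le_count_iff.mp ht
    obtain ⟨j, hj, hje⟩ := List.mem_iff_getElem.mp hmem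
    have hjlen : j < i := by simp [List.length_take] at hj; omega
    refine ⟨j, by omega, by omega, ?_⟩
    rw [← hje]; exact (List.getElem_take).symm
  · have hd : 1 ≤ (nums.drop (i+1)).count nums[i] := by omega
    have hmem : nums[i] ∈ nums.drop (i+1) := List.one_le_count_iff.mp hd
    obtain ⟨m, hm, hme⟩ := List.mem_iff_getElem.mp hmem
    have hmlen : i + 1 + m < nums.length := by
      have := List.length_drop (l := nums) (i := i+1) ▸ hm
      omega
    refine ⟨i + 1 + m, hmlen, by omega, ?_⟩
    rw [← hme]; exact (List.getElem_drop).symm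

lemma pvNo_other (nums : List Int) (i : Nat) (hi : i < nums.length)
    (h1 : nums.count nums[i] = 1) :
    ∀ j, ∀ hj : j < nums.length, j ≠ i → nums[j] ≠ nums[i] := by
  intro j hj hne
  have hs := pvCount_split nums i hi
  have ht : (nums.take i).count nums[i] = 0 := by omega
  have hd : (nums.drop (i+1)).count nums[i] = 0 := by omega
  intro heq
  rcases Nat.lt_or_ge j i with hlt | hge
  · have : nums[i] ∈ nums.take i := by
      apply List.mem_iff_getElem.mpr
      refine ⟨j, by simp; omega, ?_⟩
      rw [List.getElem_take]; exact heq
    rw [List.count_eq_zero] at ht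
    exact ht this
  · have hgt : i + 1 ≤ j := by omega
    have : nums[i] ∈ nums.drop (i+1) := by
      apply List.mem_iff_getElem.mpr
      refine ⟨j - (i+1), by simp; omega, ?_⟩
      rw [List.getElem_drop]
      have : i + 1 + (j - (i+1)) = j := by omega
      simp [this]
      exact heq
    rw [List.count_eq_zero] at hd
    exact hd this

lemma pvFirstD_getD_of_mem (nums : List Int) (w : Int) (hw : w ∈ nums) :
    ∃ jw : Nat, ∃ hjw : jw < nums.length,
      nums[jw] = w ∧ (∀ j, ∀ hj : j < jw, nums[j]'(by omega) ≠ w) ∧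
      (pvFirstD nums).getD w 0 = (jw : Int) := by
  obtain ⟨k, hk⟩ := Option.isSome_iff_exists.mp ((PySem.List.index?_isSome_iff nums w).mpr hw)
  obtain ⟨hklt, hke, hkmin⟩ := PySem.List.getElem_of_index?_eq_some hk
  refine ⟨k, hklt, hke, fun j hj => hkmin j hj, ?_⟩
  rw [PySem.Dict.getD_eq_get?_getD, pvFirstD_get', hk]
  rfl

lemma pvPyGetD_idx (l : List Int) (j : Int) (n : Nat) (hj : j = (n : Int)) (hn : n < l.length) :
    PySem.List.pyGetD l j 0 = l[n] := by
  subst hj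
  rw [PySem.List.pyGetD_eq_getElem _ _ (by omega) (by exact_mod_cast hn)]
  congr 1

lemma pvMin2_single (c : Int × Int × Int) :
    PySem.List.min2? [c] (·.1) (·.2.1) = some c := rfl

lemma pvMin2_pair_left (c1 c2 : Int × Int × Int) (h : pvLexLe c1 c2) :
    PySem.List.min2? [c1, c2] (·.1) (·.2.1) = some c1 := by
  unfold PySem.List.min2?
  simp only [List.foldl_cons, List.foldl_nil]
  rw [if_neg]
  unfold pvLexLe at h
  simp only [Bool.or_eq_true, Bool.and_eq_true, Bool.not_eq_true', decide_eq_true_eq,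
    decide_eq_false_iff_not, not_or, not_and]
  omega

lemma pvMin2_pair_right (c1 c2 : Int × Int × Int) (h : pvLexLe c2 c1) (hj : c2.2.1 ≠ c1.2.1) :
    PySem.List.min2? [c1, c2] (·.1) (·.2.1) = some c2 := by
  unfold PySem.List.min2?
  simp only [List.foldl_cons, List.foldl_nil]
  rw [if_pos]
  unfold pvLexLe at h
  simp only [Bool.or_eq_true, Bool.and_eq_true, Bool.not_eq_true', decide_eq_true_eq,
    decide_eq_false_iff_not]
  omega

-- ---------- the crux: per element, first-min over all candidates = B's sorted-neighbour pick ----------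

lemma pvCrux (nums : List Int) (i : Nat) (hi : i < nums.length) :
    ((pvCands nums (i : Int) nums[i]).foldl pvStep3 none).map (·.2.2) =
      (match PySem.List.index? (pvVals nums) nums[i] with
       | some k => some (pvBF (pvVals nums) (pvFirstD nums) (pvCountD nums) (k : Int) nums[i])
       | none => none).getD none := by
  have hvmem : nums[i] ∈ nums := List.getElem_mem hi
  have hvvals : nums[i] ∈ pvVals nums := (mem_pvVals nums _).mpr hvmem
  obtain ⟨k, hk⟩ := Option.isSome_iff_exists.mp ((PySem.List.index?_isSome_iff _ _).mpr hvvals)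
  obtain ⟨hklt, hvk, hkmin⟩ := PySem.List.getElem_of_index?_eq_some hk
  rw [hk]
  have hmatch : (match some k with
      | some k => some (pvBF (pvVals nums) (pvFirstD nums) (pvCountD nums) (k : Int) nums[i])
      | none => (none : Option (Option Int))) = some (pvBF (pvVals nums) (pvFirstD nums) (pvCountD nums) (k : Int) nums[i]) := rfl
  rw [hmatch, Option.getD_some]
  unfold pvBF
  rw [pvCountD_getD]
  have hcountpos : 1 ≤ nums.count nums[i] := List.one_le_count_iff.mpr hvmem
  by_cases hdup : 1 < (nums.count nums[i] : Int)
  · -- duplicated value: nearest is the value itself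
    rw [if_pos hdup]
    obtain ⟨j, hj, hji, hjv⟩ := pvExists_other nums i hi (by exact_mod_cast hdup)
    have hjc : (|nums[i] - nums[j]|, (j : Int), nums[j]) ∈ pvCands nums (i : Int) nums[i] :=
      (mem_pvCands nums (i : Int) nums[i] _).mpr ⟨j, hj, by omega, rfl⟩
    cases hfold : (pvCands nums (i : Int) nums[i]).foldl pvStep3 none with
    | none =>
      rw [(pvFold3_none _).mp hfold] at hjc
      simp at hjc
    | some c =>
      obtain ⟨hcmem, hcle⟩ := pvFold3_isMin _ (pairwise_pvCands nums _ _) c hfold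
      obtain ⟨kc, hkc, hikc, hceq⟩ := (mem_pvCands nums _ _ c).mp hcmem
      have hle := hcle _ hjc
      have hd0 : |nums[i] - nums[kc]| = 0 := by
        have h1 : (0:Int) ≤ |nums[i] - nums[kc]| := abs_nonneg _
        have h2 : |nums[i] - nums[j]| = 0 := by rw [hjv]; simp
        unfold pvLexLe at hle
        rw [hceq] at hle
        simp only at hle
        omega
      have : nums[kc] = nums[i] := by
        have := abs_eq_zero.mp hd0
        omega
      rw [hceq]
      simp [this]
  · -- unique value: nearest is an adjacent distinct value (or none)
    rw [if_neg hdup]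
    have hone : nums.count nums[i] = 1 := by omega
    have hno := pvNo_other nums i hi hone
    cases hfold : (pvCands nums (i : Int) nums[i]).foldl pvStep3 none with
    | none =>
      have hempty : pvCands nums (i : Int) nums[i] = [] := (pvFold3_none _).mp hfold
      have hn1 : nums.length = 1 := by
        by_contra hne
        have hex : ∃ j : Nat, j < nums.length ∧ j ≠ i := by
          by_cases h0 : i = 0
          · exact ⟨1, by omega, by omega⟩
          · exact ⟨0, by omega, by omega⟩
        obtain ⟨j, hjl, hji⟩ := hex
        have : (|nums[i] - nums[j]|, (j : Int), nums[j]) ∈ pvCands nums (i : Int) nums[i] :=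
          (mem_pvCands nums (i : Int) nums[i] _).mpr ⟨j, hjl, by omega, rfl⟩
        rw [hempty] at this
        simp at this
      have hi0 : i = 0 := by omega
      subst hi0
      obtain ⟨a, ha⟩ := List.length_eq_one_iff.mp hn1
      subst ha
      have h0 : ([a] : List Int)[0] = a := rfl
      rw [h0] at hk ⊢
      have hvals : pvVals [a] = [a] := rfl
      have hk0 : k = 0 := by
        rw [hvals, PySem.List.index?_cons_self] at hk
        simpa using hk.symm
      subst hk0
      simp [hvals, PySem.List.min2?]
    | some c =>
      obtain ⟨hcmem, hcle⟩ := pvFold3_isMin _ (pairwise_pvCands nums _ _) c hfold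
      obtain ⟨kc, hkc, hikc, hceq⟩ := (mem_pvCands nums _ _ c).mp hcmem
      have hocne : nums[kc] ≠ nums[i] := hno kc hkc (by omega)
      -- position of nums[kc] among the sorted distinct values
      obtain ⟨m, hm, hmoc⟩ := List.mem_iff_getElem.mp
        ((mem_pvVals nums nums[kc]).mpr (List.getElem_mem hkc))
      have hmono : ∀ (a b : Nat) (ha : a < (pvVals nums).length) (hb : b < (pvVals nums).length),
          a < b → (pvVals nums)[a] < (pvVals nums)[b] := by
        intro a b ha hb hab
        exact List.pairwise_iff_getElem.mp (pvVals_pairwise nums) a b ha hb hab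
      have hmk : m ≠ k := by
        intro h
        subst h
        apply hocne
        rw [← hmoc]
        exact hvk
      rcases Nat.lt_or_ge m k with hmlt | hmge
      · -- the best candidate sits below: it is the left neighbour vals[k-1]
        have hkpos : 0 < k := by omega
        have hplt : (pvVals nums)[k-1] < nums[i] := by
          rw [← hvk]; exact hmono (k-1) k (by omega) hklt (by omega)
        have hocle : nums[kc] ≤ (pvVals nums)[k-1] := by
          rcases Nat.lt_or_ge m (k-1) with hlt | hge
          · rw [← hmoc]; exact le_of_lt (hmono m (k-1) (by omega) (by omega) hlt)
          · have he : m = k - 1 := by omega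
            subst he
            rw [← hmoc]
        have hpmem : (pvVals nums)[k-1] ∈ nums :=
          (mem_pvVals nums _).mp (List.getElem_mem (by omega))
        obtain ⟨jp, hjp, hjpv, hjpmin, hjpgetD⟩ := pvFirstD_getD_of_mem nums _ hpmem
        have hjpi : jp ≠ i := by
          intro h
          subst h
          rw [hjpv] at hplt
          exact lt_irrefl _ hplt
        -- the overall first-minimum candidate is exactly the left-neighbour candidate
        have hcpmem : (|nums[i] - nums[jp]|, (jp : Int), nums[jp]) ∈ pvCands nums (i : Int) nums[i] :=
          (mem_pvCands nums (i : Int) nums[i] _).mpr ⟨jp, hjp, by omega, rfl⟩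
        have hlep := hcle _ hcpmem
        have habs1 : |nums[i] - nums[kc]| = nums[i] - nums[kc] := abs_of_nonneg (by omega)
        have habs2 : |nums[i] - nums[jp]| = nums[i] - (pvVals nums)[k-1] := by
          rw [hjpv]; exact abs_of_nonneg (by omega)
        rw [hceq] at hlep
        unfold pvLexLe at hlep
        simp only at hlep
        rw [habs1, habs2] at hlep
        have hocp : nums[kc] = (pvVals nums)[k-1] := by omega
        have hjple : jp ≤ kc := by
          by_contra hlt
          exact hjpmin kc (by omega) hocp
        have hkcjp : (kc : Int) = (jp : Int) := by omega
        have hc2 : c = (nums[i] - (pvVals nums)[k-1], (jp : Int), (pvVals nums)[k-1]) := by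
          rw [hceq, habs1, hocp, hkcjp]
        rw [hc2]
        rw [if_pos (show (0:Int) < (k : Int) by omega)]
        rw [pvPyGetD_idx (pvVals nums) ((k : Int) - 1) (k-1) (by omega) (by omega)]
        rw [hjpgetD]
        by_cases hql : (k : Int) + 1 < ((pvVals nums).length : Int)
        · rw [if_pos hql]
          have hk1 : k + 1 < (pvVals nums).length := by omega
          rw [pvPyGetD_idx (pvVals nums) ((k : Int) + 1) (k+1) (by omega) hk1]
          have hqmem : (pvVals nums)[k+1] ∈ nums := (mem_pvVals nums _).mp (List.getElem_mem hk1)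
          obtain ⟨jq, hjq, hjqv, hjqmin, hjqgetD⟩ := pvFirstD_getD_of_mem nums _ hqmem
          rw [hjqgetD]
          have hvq : nums[i] < (pvVals nums)[k+1] := by
            rw [← hvk]; exact hmono k (k+1) (by omega) hk1 (by omega)
          have hjqi : jq ≠ i := by
            intro h
            subst h
            rw [← hjqv] at hvq
            exact lt_irrefl _ hvq
          have hcqmem : (|nums[i] - nums[jq]|, (jq : Int), nums[jq]) ∈ pvCands nums (i : Int) nums[i] :=
            (mem_pvCands nums (i : Int) nums[i] _).mpr ⟨jq, hjq, by omega, rfl⟩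
          have hleq := hcle _ hcqmem
          have habs3 : |nums[i] - nums[jq]| = (pvVals nums)[k+1] - nums[i] := by
            rw [hjqv, abs_sub_comm]; exact abs_of_nonneg (by omega)
          rw [hc2, habs3, hjqv] at hleq
          simp only [List.singleton_append]
          rw [pvMin2_pair_left _ _ hleq]
        · rw [if_neg hql]
          simp only [List.append_nil]
          rw [pvMin2_single]
      · -- the best candidate sits above: it is the right neighbour vals[k+1]
        have hmgt : k < m := by omega
        have hk1 : k + 1 < (pvVals nums).length := by omega
        have hqgt : nums[i] < (pvVals nums)[k+1] := by
          rw [← hvk]; exact hmono k (k+1) (by omega) hk1 (by omega)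
        have hocge : (pvVals nums)[k+1] ≤ nums[kc] := by
          rcases Nat.lt_or_ge (k+1) m with hlt | hge
          · rw [← hmoc]; exact le_of_lt (hmono (k+1) m hk1 hm hlt)
          · have he : m = k + 1 := by omega
            subst he
            rw [← hmoc]
        have hqmem : (pvVals nums)[k+1] ∈ nums := (mem_pvVals nums _).mp (List.getElem_mem hk1)
        obtain ⟨jq, hjq, hjqv, hjqmin, hjqgetD⟩ := pvFirstD_getD_of_mem nums _ hqmem
        have hjqi : jq ≠ i := by
          intro h
          subst h
          rw [← hjqv] at hqgt
          exact lt_irrefl _ hqgt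
        have hcqmem : (|nums[i] - nums[jq]|, (jq : Int), nums[jq]) ∈ pvCands nums (i : Int) nums[i] :=
          (mem_pvCands nums (i : Int) nums[i] _).mpr ⟨jq, hjq, by omega, rfl⟩
        have hleq := hcle _ hcqmem
        have habs1 : |nums[i] - nums[kc]| = nums[kc] - nums[i] := by
          rw [abs_sub_comm]; exact abs_of_nonneg (by omega)
        have habs3 : |nums[i] - nums[jq]| = (pvVals nums)[k+1] - nums[i] := by
          rw [hjqv, abs_sub_comm]; exact abs_of_nonneg (by omega)
        rw [hceq] at hleq
        unfold pvLexLe at hleq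
        simp only at hleq
        rw [habs1, habs3] at hleq
        have hocq : nums[kc] = (pvVals nums)[k+1] := by omega
        have hjqle : jq ≤ kc := by
          by_contra hlt
          exact hjqmin kc (by omega) hocq
        have hkcjq : (kc : Int) = (jq : Int) := by omega
        have hc2 : c = ((pvVals nums)[k+1] - nums[i], (jq : Int), (pvVals nums)[k+1]) := by
          rw [hceq, habs1, hocq, hkcjq]
        rw [hc2]
        rw [if_pos (show (k : Int) + 1 < ((pvVals nums).length : Int) by omega)]
        rw [pvPyGetD_idx (pvVals nums) ((k : Int) + 1) (k+1) (by omega) hk1]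
        rw [hjqgetD]
        by_cases hpl : (0 : Int) < (k : Int)
        · rw [if_pos hpl]
          have hkpos : 0 < k := by omega
          rw [pvPyGetD_idx (pvVals nums) ((k : Int) - 1) (k-1) (by omega) (by omega)]
          have hplt : (pvVals nums)[k-1] < nums[i] := by
            rw [← hvk]; exact hmono (k-1) k (by omega) hklt (by omega)
          have hpmem : (pvVals nums)[k-1] ∈ nums :=
            (mem_pvVals nums _).mp (List.getElem_mem (by omega))
          obtain ⟨jp, hjp, hjpv, hjpmin, hjpgetD⟩ := pvFirstD_getD_of_mem nums _ hpmem
          rw [hjpgetD]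
          have hjpi : jp ≠ i := by
            intro h
            subst h
            rw [hjpv] at hplt
            exact lt_irrefl _ hplt
          have hcpmem : (|nums[i] - nums[jp]|, (jp : Int), nums[jp]) ∈ pvCands nums (i : Int) nums[i] :=
            (mem_pvCands nums (i : Int) nums[i] _).mpr ⟨jp, hjp, by omega, rfl⟩
          have hlep := hcle _ hcpmem
          have habs2 : |nums[i] - nums[jp]| = nums[i] - (pvVals nums)[k-1] := by
            rw [hjpv]; exact abs_of_nonneg (by omega)
          rw [hc2, habs2, hjpv] at hlep
          have hjne : (jq : Int) ≠ (jp : Int) := by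
            intro h
            have hq : jq = jp := by omega
            subst hq
            rw [hjqv] at hjpv
            have hlt := hmono (k-1) (k+1) (by omega) hk1 (by omega)
            omega
          simp only [List.singleton_append]
          rw [pvMin2_pair_right _ _ hlep hjne]
        · rw [if_neg hpl]
          simp only [List.nil_append]
          rw [pvMin2_single]

-- ===== VERDICT (by name: the statement is the Claim_ definition above) =====
theorem find_closest_numbers_spec : Claim_equal_find_closest_numbers := by
  intro nums _
  unfold Spec_find_closest_numbers
  rw [pvB_closed]
  unfold find_closest_numbers
  have hmap := PySem.List.foldl_append_singleton_eq_map
    (fun p : Int × Int => (pvInnerA nums p.1 p.2).1) (PySem.List.enumerate nums) []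
  simp only [List.nil_append] at hmap
  rw [hmap]
  apply List.ext_getElem
  · simp [PySem.List.length_enumerate]
  · intro k h1 h2
    have hk : k < nums.length := by simpa [PySem.List.length_enumerate] using h1
    simp only [List.getElem_map, PySem.List.getElem_enumerate, zero_add]
    rw [pvInnerA_eq_fold]
    exact pvCrux nums k hk
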